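-- pv_equiv track=rewrite | github.com/ARSENOV95/PYTHON_FUNDAMENTALS_2025 | LABS/02_DATA_TYPES/09_TEXT_PROCESSING/09.py | final_message
-- ===== SOURCE A (Python) =====
-- def final_message(string :str)-> str:
--
--     current_string = ''
--     message = ''
--     count_unique_chars = []
--     num = ''
--
--     for index in range(len(string)):
--         if not(string[index].isdigit()):
--             lower = string[index].lower()
--             if lower not in count_unique_chars:
--                 count_unique_chars.append(lower)
--             current_string += string[index]
--
--         else:
--             for next_char in range(index,len(string)):
--                 if not string[next_char].isdigit():
--                     break
--                 num += string[next_char]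
--
--             message += (current_string * int(num)).upper()
--             current_string = ''
--             num= ''
--
--     return f"Unique symbols used: {len(count_unique_chars)} \n{message}"
-- ===== SOURCE B (Python) =====
-- def final_message(string: str) -> str:
--     # Single pass over maximal runs (two-pointer), set for uniqueness.
--     unique = set()
--     message = ''
--     current_text = ''
--     i, n = 0, len(string)
--     while i < n:
--         j = i
--         if string[i].isdigit():
--             while j < n and string[j].isdigit():
--                 j += 1
--             message += (current_text * int(string[i:j])).upper()
--             current_text = ''
--         else:
--             while j < n and not string[j].isdigit():
--                 j += 1
--             run = string[i:j]
--             unique.update(run.lower())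
--             current_text = run
--         i = j
--     return f"Unique symbols used: {len(unique)} \n{message}"
-- ===== Notes on version B (the rewrite author's own statement) =====
-- stated objective: faster
-- what changed: Replaces A's per-character loop, which re-scans each digit run once per digit and does a linear list membership test per character, with a single two-pointer pass over maximal digit/non-digit runs using a set for the uniqueness count.
import Mathlib
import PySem

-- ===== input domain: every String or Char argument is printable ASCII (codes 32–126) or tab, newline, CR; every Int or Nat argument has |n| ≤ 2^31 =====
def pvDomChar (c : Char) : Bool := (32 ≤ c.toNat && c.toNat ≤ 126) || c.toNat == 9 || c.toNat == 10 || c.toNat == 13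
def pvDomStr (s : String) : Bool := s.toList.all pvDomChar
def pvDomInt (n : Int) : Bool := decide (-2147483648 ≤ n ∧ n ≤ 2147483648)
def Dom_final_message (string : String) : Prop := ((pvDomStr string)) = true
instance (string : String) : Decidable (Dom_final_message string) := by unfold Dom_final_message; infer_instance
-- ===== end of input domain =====

-- B replaces A's char-at-a-time loop (with an inner digit re-scan and a list membership scan)
-- by a single pass over maximal digit/non-digit runs with a set; return value only, no mutation.

-- int(num): in both programs the argument is a nonempty ASCII digit run, so ofChars? never
-- returns none there; getD 0 is the unreachable default.
def pvParseInt (cs : List Char) : Int := (PySem.Int.ofChars? cs).getD 0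

-- ===== PORT A =====
-- inner 'for next_char in range(index, len(string))' with its break: collect digits from the suffix
def pvInnerA (num : List Char) (rest : List Char) : List Char :=
  match rest with
  | [] => num
  | c :: r => if !(PySem.Chars.isdigit c) then num else pvInnerA (num ++ [c]) r

-- outer 'for index in range(len(string))': index ↦ remaining suffix; state (cur, msg, uniq, num)
def pvLoopA (cur msg uniq num : List Char) (rest : List Char) : List Char × List Char :=
  match rest with
  | [] => (uniq, msg)
  | c :: r =>
    if !(PySem.Chars.isdigit c) then
      let lower := PySem.Chars.lowerChar c
      let uniq' := if uniq.contains lower then uniq else uniq ++ [lower]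
      pvLoopA (cur ++ [c]) msg uniq' num r
    else
      let num' := pvInnerA num (c :: r)
      let msg' := msg ++ (PySem.List.pyRepeat cur (pvParseInt num')).map PySem.Chars.upperChar
      pvLoopA [] msg' uniq [] r

def final_message (string : String) : String :=
  let res := pvLoopA [] [] [] [] string.toList
  "Unique symbols used: " ++ PySem.Int.toStr (res.1.length : Int) ++ " \n" ++ String.mk res.2

-- ===== PORT B =====
-- while i < n: advance over a maximal digit run or a maximal text run (i..j ↦ takeWhile/dropWhile)
def pvLoopB (uniq : PySem.Set Char) (msg cur : List Char) (rest : List Char) :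
    PySem.Set Char × List Char :=
  match rest with
  | [] => (uniq, msg)
  | c :: r =>
    if PySem.Chars.isdigit c then
      let run := c :: r.takeWhile PySem.Chars.isdigit
      pvLoopB uniq (msg ++ (PySem.List.pyRepeat cur (pvParseInt run)).map PySem.Chars.upperChar)
        [] (r.dropWhile PySem.Chars.isdigit)
    else
      let run := c :: r.takeWhile (fun x => !PySem.Chars.isdigit x)
      pvLoopB (PySem.Set.update uniq (run.map PySem.Chars.lowerChar)) msg run
        (r.dropWhile (fun x => !PySem.Chars.isdigit x))
  termination_by rest.length
  decreasing_by
  · have := List.length_dropWhile_le (p := PySem.Chars.isdigit) (l := r); simp; omega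
  · have := List.length_dropWhile_le (p := fun x => !PySem.Chars.isdigit x) (l := r); simp; omega

def final_message_alt (string : String) : String :=
  let res := pvLoopB PySem.Set.empty [] [] string.toList
  "Unique symbols used: " ++ PySem.Int.toStr (res.1.length : Int) ++ " \n" ++ String.mk res.2

-- ===== PRECONDITION & SPEC =====
def Spec_final_message (string : String) (out : String) : Prop := out = final_message_alt string
instance (string : String) (out : String) : Decidable (Spec_final_message string out) := by unfold Spec_final_message; infer_instance

-- ===== CLAIM (what is proved, stated in full; the proofs are below) =====
def Claim_equal_final_message : Prop := ∀ (string : String), Dom_final_message string → Spec_final_message string (final_message string)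

-- ===== LEMMAS AND PROOFS =====

/-- "the next char (if any) is not a digit" -/
def pvHeadND (l : List Char) : Prop := ∀ c, l.head? = some c → PySem.Chars.isdigit c = false

theorem pvHeadND_nil : pvHeadND [] := by intro c h; simp at h

theorem pvHeadND_dropWhile (r : List Char) :
    pvHeadND (r.dropWhile PySem.Chars.isdigit) := by
  induction r with
  | nil => exact pvHeadND_nil
  | cons c r ih =>
    by_cases h : PySem.Chars.isdigit c = true
    · simpa [List.dropWhile_cons, h] using ih
    · intro d hd
      have hcd : c = d := by simpa [List.dropWhile_cons, Bool.eq_false_iff.mpr h] using hd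
      rw [← hcd]; exact Bool.eq_false_iff.mpr h

theorem pvHeadD_dropWhile (r : List Char) (c : Char)
    (h : (r.dropWhile (fun x => !PySem.Chars.isdigit x)).head? = some c) :
    PySem.Chars.isdigit c = true := by
  induction r with
  | nil => simp at h
  | cons a r ih =>
    by_cases ha : PySem.Chars.isdigit a = true
    · have hac : a = c := by simpa [List.dropWhile_cons, ha] using h
      rw [← hac]; exact ha
    · simp only [List.dropWhile_cons] at h
      rw [show (!PySem.Chars.isdigit a) = true by simp [Bool.eq_false_iff.mpr ha]] at h
      exact ih h

theorem pvInnerA_digits (d : List Char) (num rest : List Char)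
    (hd : ∀ c ∈ d, PySem.Chars.isdigit c = true) (hr : pvHeadND rest) :
    pvInnerA num (d ++ rest) = num ++ d := by
  induction d generalizing num with
  | nil =>
    cases rest with
    | nil => simp [pvInnerA]
    | cons c r => simp [pvInnerA, hr c rfl]
  | cons c d ih =>
    have hc := hd c (by simp)
    simp only [List.cons_append, pvInnerA, hc, Bool.not_true, Bool.false_eq_true, if_false]
    rw [ih (num ++ [c]) (fun x hx => hd x (List.mem_cons_of_mem _ hx))]
    simp

theorem pvRepeat_nil (n : Int) : PySem.List.pyRepeat ([] : List Char) n = [] := by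
  simp [PySem.List.pyRepeat]

theorem pvLoopA_digit_tail (d : List Char) (msg uniq rest : List Char)
    (hd : ∀ c ∈ d, PySem.Chars.isdigit c = true) (hr : pvHeadND rest) :
    pvLoopA [] msg uniq [] (d ++ rest) = pvLoopA [] msg uniq [] rest := by
  induction d generalizing msg with
  | nil => simp
  | cons c d ih =>
    have hc := hd c (by simp)
    simp only [List.cons_append, pvLoopA, hc, Bool.not_true, Bool.false_eq_true, if_false]
    rw [show (c :: (d ++ rest)) = (c :: d) ++ rest from rfl,
        pvInnerA_digits (c :: d) [] rest hd hr, pvRepeat_nil]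
    simp only [List.map_nil, List.append_nil]
    exact ih msg (fun x hx => hd x (List.mem_cons_of_mem _ hx))

theorem pvLoopA_text (t : List Char) (cur msg uniq rest : List Char)
    (ht : ∀ c ∈ t, PySem.Chars.isdigit c = false) :
    pvLoopA cur msg uniq [] (t ++ rest) =
      pvLoopA (cur ++ t) msg
        (t.foldl (fun u c => PySem.Set.add u (PySem.Chars.lowerChar c)) uniq) [] rest := by
  induction t generalizing cur uniq with
  | nil => simp
  | cons c t ih =>
    have hc := ht c (by simp)
    simp only [List.cons_append, pvLoopA, hc, Bool.not_false, if_true, List.foldl_cons]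
    rw [ih (cur ++ [c]) _ (fun x hx => ht x (by simp [hx]))]
    simp [PySem.Set.add, PySem.Set.contains]

theorem pvLoop_main (n : ℕ) (l : List Char) (hn : l.length ≤ n) (cur msg : List Char)
    (uniq : List Char)
    (hcur : ∀ c, l.head? = some c → PySem.Chars.isdigit c = false → cur = []) :
    pvLoopA cur msg uniq [] l = pvLoopB uniq msg cur l := by
  induction n generalizing l cur msg uniq with
  | zero =>
    have : l = [] := List.length_eq_zero_iff.mp (Nat.le_zero.mp hn)
    subst this; simp [pvLoopA, pvLoopB]
  | succ n ih =>
    cases l with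
    | nil => simp [pvLoopA, pvLoopB]
    | cons c r =>
      by_cases hc : PySem.Chars.isdigit c = true
      · -- digit run
        have hsplit : c :: r =
            (c :: r.takeWhile PySem.Chars.isdigit) ++ r.dropWhile PySem.Chars.isdigit := by
          simp [List.takeWhile_append_dropWhile]
        have hall : ∀ x ∈ c :: r.takeWhile PySem.Chars.isdigit,
            PySem.Chars.isdigit x = true := by
          intro x hx
          rcases List.mem_cons.mp hx with h | h
          · simpa [h] using hc
          · exact List.mem_takeWhile_imp h
        have hnd := pvHeadND_dropWhile r
        have hA : pvLoopA cur msg uniq [] (c :: r) =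
            pvLoopA []
              (msg ++ (PySem.List.pyRepeat cur
                (pvParseInt (c :: r.takeWhile PySem.Chars.isdigit))).map PySem.Chars.upperChar)
              uniq [] (r.dropWhile PySem.Chars.isdigit) := by
          conv_lhs => rw [hsplit]
          simp only [List.cons_append, pvLoopA, hc, Bool.not_true, Bool.false_eq_true, if_false]
          rw [show (c :: (r.takeWhile PySem.Chars.isdigit ++ r.dropWhile PySem.Chars.isdigit))
                = (c :: r.takeWhile PySem.Chars.isdigit) ++ r.dropWhile PySem.Chars.isdigit
                from rfl,
              pvInnerA_digits (c :: r.takeWhile PySem.Chars.isdigit) [] _ hall hnd,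
              pvLoopA_digit_tail (r.takeWhile PySem.Chars.isdigit) _ uniq _
                (fun x hx => hall x (List.mem_cons_of_mem _ hx)) hnd]
          simp
        rw [hA]
        rw [ih (r.dropWhile PySem.Chars.isdigit)
              (by have := List.length_dropWhile_le (p := PySem.Chars.isdigit) (l := r)
                  simp at hn; omega)
              [] _ uniq (by intro x hx _; rfl)]
        conv_rhs => rw [pvLoopB]
        simp [hc]
      · -- text run
        have hc' : PySem.Chars.isdigit c = false := Bool.eq_false_iff.mpr hc
        have hcur0 : cur = [] := hcur c rfl hc'
        subst hcur0
        have hsplit : c :: r =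
            (c :: r.takeWhile (fun x => !PySem.Chars.isdigit x)) ++
              r.dropWhile (fun x => !PySem.Chars.isdigit x) := by
          simp [List.takeWhile_append_dropWhile]
        have hall : ∀ x ∈ c :: r.takeWhile (fun x => !PySem.Chars.isdigit x),
            PySem.Chars.isdigit x = false := by
          intro x hx
          rcases List.mem_cons.mp hx with h | h
          · simpa [h] using hc'
          · have := List.mem_takeWhile_imp h; simpa using this
        have hA : pvLoopA [] msg uniq [] (c :: r) =
            pvLoopA (c :: r.takeWhile (fun x => !PySem.Chars.isdigit x)) msg
              ((c :: r.takeWhile (fun x => !PySem.Chars.isdigit x)).foldl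
                (fun u x => PySem.Set.add u (PySem.Chars.lowerChar x)) uniq) []
              (r.dropWhile (fun x => !PySem.Chars.isdigit x)) := by
          conv_lhs => rw [hsplit]
          rw [pvLoopA_text _ [] msg uniq _ hall]
          simp
        rw [hA]
        rw [ih (r.dropWhile (fun x => !PySem.Chars.isdigit x))
              (by have := List.length_dropWhile_le
                    (p := fun x => !PySem.Chars.isdigit x) (l := r)
                  simp at hn; omega)
              _ msg _
              (by intro x hx hxnd
                  have := pvHeadD_dropWhile r x hx
                  rw [this] at hxnd; cases hxnd)]
        conv_rhs => rw [pvLoopB]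
        simp only [hc', Bool.false_eq_true, if_false]
        rw [← PySem.Set.update_map_eq_foldl_add]

-- ===== VERDICT (by name: the statement is the Claim_ definition above) =====
theorem final_message_spec : Claim_equal_final_message := by
  intro s _
  unfold Spec_final_message final_message final_message_alt
  rw [pvLoop_main s.toList.length s.toList le_rfl [] [] [] (by intro c h _; rfl)]
  rfl
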